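-- pv_equiv track=rewrite | github.com/z1chh/Challenges | src/Tech Questions/Roblox/d.py | alloPolo
-- ===== SOURCE A (Python) =====
-- def alloPolo(memory, x):
--     start = -1
--     size = 0
--     for idx, mem in enumerate(memory):
--         if size == 0:
--             if mem == 0:
--                 size = 1
--                 start = idx
--                 if size == x:
--                     return start
--         else:
--             if mem == 0:
--                 size += 1
--                 if size == x:
--                     return start
--             else:
--                 size = 0
--     return -1
-- ===== SOURCE B (Python) =====
-- from itertools import groupby
--
-- def alloPolo(memory, x):
--     if x <= 0:
--         return -1
--     offset = 0
--     for is_zero, grp in groupby(memory, key=lambda m: m == 0):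
--         n = sum(1 for _ in grp)
--         if is_zero and n >= x:
--             return offset
--         offset += n
--     return -1
-- ===== Notes on version B (the rewrite author's own statement) =====
-- stated objective: simpler
-- what changed: B walks maximal runs with itertools.groupby and an offset counter instead of A's per-element start/size state machine; a zero-run of length >= x yields its offset.
import Mathlib
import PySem

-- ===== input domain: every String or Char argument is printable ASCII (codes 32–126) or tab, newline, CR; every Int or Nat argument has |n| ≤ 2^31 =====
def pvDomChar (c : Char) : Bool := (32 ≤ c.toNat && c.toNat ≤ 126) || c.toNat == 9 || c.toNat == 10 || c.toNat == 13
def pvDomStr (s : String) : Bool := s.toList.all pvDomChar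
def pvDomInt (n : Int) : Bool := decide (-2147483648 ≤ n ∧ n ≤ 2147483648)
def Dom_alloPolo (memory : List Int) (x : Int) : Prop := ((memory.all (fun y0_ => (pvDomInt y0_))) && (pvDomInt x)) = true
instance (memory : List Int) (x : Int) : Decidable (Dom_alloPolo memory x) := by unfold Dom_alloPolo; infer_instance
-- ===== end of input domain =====

-- B replaces A's per-element start/size state machine by a walk over maximal runs
-- (groupby) with a running offset; objective: simpler decomposition, same O(n) cost.


-- ===== PORT A =====
-- the enumerate-loop with early return, as structural recursion carrying (idx, start, size)
def alloPoloGo (l : List Int) (idx x start size : Int) : Int :=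
  match l with
  | [] => -1
  | mem :: rest =>
    if size = 0 then
      if mem = 0 then
        -- size := 1; start := idx; if size == x: return start
        if (1 : Int) = x then idx
        else alloPoloGo rest (idx + 1) x idx 1
      else alloPoloGo rest (idx + 1) x start size
    else
      if mem = 0 then
        if size + 1 = x then start
        else alloPoloGo rest (idx + 1) x start (size + 1)
      else alloPoloGo rest (idx + 1) x start 0

def alloPolo (memory : List Int) (x : Int) : Int :=
  alloPoloGo memory 0 x (-1) 0

-- ===== PORT B =====
-- groupby: consume one maximal run per step; a zero-run of length ≥ x yields the offset
def alloPoloAltGo (memory : List Int) (x offset : Int) : Int :=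
  match memory with
  | [] => -1
  | m :: rest =>
    if m = 0 then
      let n : Int := 1 + (rest.takeWhile (fun z => z == 0)).length
      if x ≤ n then offset
      else alloPoloAltGo (rest.dropWhile (fun z => z == 0)) x (offset + n)
    else
      let n : Int := 1 + (rest.takeWhile (fun z => !(z == 0))).length
      alloPoloAltGo (rest.dropWhile (fun z => !(z == 0))) x (offset + n)
termination_by memory.length
decreasing_by
  · exact Nat.lt_succ_of_le (List.length_dropWhile_le _ _)
  · exact Nat.lt_succ_of_le (List.length_dropWhile_le _ _)

def alloPolo_alt (memory : List Int) (x : Int) : Int :=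
  if x ≤ 0 then -1 else alloPoloAltGo memory x 0

-- ===== PRECONDITION & SPEC =====
def Spec_alloPolo (memory : List Int) (x : Int) (out : Int) : Prop := out = alloPolo_alt memory x
instance (memory : List Int) (x : Int) (out : Int) : Decidable (Spec_alloPolo memory x out) := by unfold Spec_alloPolo; infer_instance

-- ===== CLAIM (what is proved, stated in full; the proofs are below) =====
def Claim_equal_alloPolo : Prop := ∀ (memory : List Int) (x : Int), Dom_alloPolo memory x → Spec_alloPolo memory x (alloPolo memory x)

-- ===== LEMMAS AND PROOFS =====

-- step lemmas for the two recursions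
theorem goNil (idx x start size : Int) : alloPoloGo [] idx x start size = -1 := rfl

theorem goConsZero0 (rest : List Int) (idx x start : Int) :
    alloPoloGo (0 :: rest) idx x start 0 =
      if (1:Int) = x then idx else alloPoloGo rest (idx + 1) x idx 1 := by
  simp [alloPoloGo]

theorem goConsNonzero0 (m : Int) (rest : List Int) (idx x start : Int) (hm : m ≠ 0) :
    alloPoloGo (m :: rest) idx x start 0 = alloPoloGo rest (idx + 1) x start 0 := by
  simp [alloPoloGo, hm]

theorem goConsZeroS (rest : List Int) (idx x start size : Int) (hs : size ≠ 0) :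
    alloPoloGo (0 :: rest) idx x start size =
      if size + 1 = x then start else alloPoloGo rest (idx + 1) x start (size + 1) := by
  simp [alloPoloGo, hs]

theorem goConsNonzeroS (m : Int) (rest : List Int) (idx x start size : Int)
    (hm : m ≠ 0) (hs : size ≠ 0) :
    alloPoloGo (m :: rest) idx x start size = alloPoloGo rest (idx + 1) x start 0 := by
  simp [alloPoloGo, hm, hs]

theorem altNil (x off : Int) : alloPoloAltGo [] x off = -1 := by
  simp [alloPoloAltGo]

theorem altZero (rest : List Int) (x off : Int) :
    alloPoloAltGo (0 :: rest) x off =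
      if x ≤ 1 + ((rest.takeWhile (fun z => z == 0)).length : Int) then off
      else alloPoloAltGo (rest.dropWhile (fun z => z == 0)) x
        (off + (1 + ((rest.takeWhile (fun z => z == 0)).length : Int))) := by
  rw [alloPoloAltGo]; norm_num

theorem altNonzero (m : Int) (rest : List Int) (x off : Int) (hm : m ≠ 0) :
    alloPoloAltGo (m :: rest) x off =
      alloPoloAltGo (rest.dropWhile (fun z => !(z == 0))) x
        (off + (1 + ((rest.takeWhile (fun z => !(z == 0))).length : Int))) := by
  rw [alloPoloAltGo]; simp [hm]

-- with x ≤ 0 the equality tests 1 = x / size+1 = x never fire (size stays ≥ 0)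
theorem alloPoloGo_nonpos (l : List Int) : ∀ (idx x start size : Int), x ≤ 0 → 0 ≤ size →
    alloPoloGo l idx x start size = -1 := by
  induction l with
  | nil => intro idx x start size _ _; rfl
  | cons mem rest ih =>
    intro idx x start size hx hs
    simp only [alloPoloGo]
    split_ifs with h1 h2 h3 h4 h5 <;> first
      | omega
      | exact ih _ _ _ _ hx (by omega)

-- skipping a nonzero run in state size = 0 just advances idx
theorem alloPoloGo_nonzero_run (zs : List Int) : ∀ (rest : List Int) (idx x start : Int),
    (∀ z ∈ zs, z ≠ 0) →
    alloPoloGo (zs ++ rest) idx x start 0 = alloPoloGo rest (idx + zs.length) x start 0 := by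
  induction zs with
  | nil => intro rest idx x start _; simp
  | cons z zs ih =>
    intro rest idx x start hz
    have hz0 : z ≠ 0 := hz z (by simp)
    rw [List.cons_append, goConsNonzero0 z _ _ _ _ hz0,
      ih rest (idx + 1) x start (fun w hw => hz w (by simp [hw]))]
    congr 1
    simp only [List.length_cons]
    push_cast
    ring

-- inside a zero run with 1 ≤ size < x: return start as soon as the run reaches x
theorem alloPoloGo_zero_run (zs : List Int) : ∀ (rest : List Int) (idx x start size : Int),
    (∀ z ∈ zs, z = 0) → 1 ≤ size → size < x →
    alloPoloGo (zs ++ rest) idx x start size =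
      if x ≤ size + zs.length then start
      else alloPoloGo rest (idx + zs.length) x start (size + zs.length) := by
  induction zs with
  | nil =>
    intro rest idx x start size _ h1 h2
    simp only [List.nil_append, List.length_nil, Nat.cast_zero, add_zero]
    rw [if_neg (by omega)]
  | cons z zs ih =>
    intro rest idx x start size hz h1 h2
    have hz0 : z = 0 := hz z (by simp)
    subst hz0
    rw [List.cons_append, goConsZeroS _ _ _ _ _ (by omega)]
    by_cases hx : size + 1 = x
    · rw [if_pos hx, if_pos (by simp only [List.length_cons]; push_cast; omega)]
    · rw [if_neg hx, ih rest (idx + 1) x start (size + 1)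
        (fun w hw => hz w (by simp [hw])) (by omega) (by omega)]
      have e1 : size + 1 + (zs.length : Int) = size + (((0:Int) :: zs).length : Int) := by
        simp only [List.length_cons]; push_cast; ring
      have e2 : idx + 1 + (zs.length : Int) = idx + (((0:Int) :: zs).length : Int) := by
        simp only [List.length_cons]; push_cast; ring
      rw [e1, e2]

-- main lemma: from state size = 0 the state machine computes the run walk
theorem alloPoloGo_eq_alt (n : Nat) : ∀ (memory : List Int), memory.length ≤ n →
    ∀ (idx x start : Int), 1 ≤ x →
    alloPoloGo memory idx x start 0 = alloPoloAltGo memory x idx := by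
  induction n with
  | zero =>
    intro memory hlen idx x start hx
    have h0 : memory = [] := List.eq_nil_of_length_eq_zero (Nat.le_zero.mp hlen)
    subst h0; rw [goNil, altNil]
  | succ n ih =>
    intro memory hlen idx x start hx
    match memory with
    | [] => rw [goNil, altNil]
    | m :: rest =>
      by_cases hm : m = 0
      · -- a zero run of length 1 + |zs|
        subst hm
        rw [goConsZero0, altZero]
        set zs := rest.takeWhile (fun z => z == 0) with hzs
        set rest' := rest.dropWhile (fun z => z == 0) with hrest'
        have hsplit : zs ++ rest' = rest := List.takeWhile_append_dropWhile
        have hall : ∀ z ∈ zs, z = 0 := by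
          intro z hz
          rw [hzs] at hz
          simpa using List.mem_takeWhile_imp hz
        have hlen' : rest'.length ≤ n := by
          have hd : rest'.length ≤ rest.length := by
            rw [hrest']; exact List.length_dropWhile_le _ _
          simp only [List.length_cons] at hlen
          omega
        by_cases h1 : (1 : Int) = x
        · rw [if_pos h1, if_pos (by omega)]
        · rw [if_neg h1, ← hsplit,
            alloPoloGo_zero_run zs rest' (idx + 1) x idx 1 hall (by omega) (by omega)]
          by_cases hge : x ≤ 1 + (zs.length : Int)
          · rw [if_pos hge, if_pos hge]
          · rw [if_neg hge, if_neg hge]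
            -- rest' is empty or starts with a nonzero element; either way size resets to 0
            rcases hE : rest' with _ | ⟨r, tail⟩
            · rw [goNil, altNil]
            · have hdw : rest.dropWhile (fun z => z == 0) = r :: tail := by
                rw [← hrest', hE]
              have hne : rest.dropWhile (fun z => z == 0) ≠ [] := by
                rw [hdw]; simp
              have hhead := List.head_dropWhile_not (fun z => z == 0) hne
              simp only [hdw, List.head_cons] at hhead
              have hrne : r ≠ 0 := by simpa using hhead
              have hstep := ih (r :: tail) (hE ▸ hlen') (idx + (1 + (zs.length : Int))) x idx hx
              rw [goConsNonzeroS r tail _ _ _ _ hrne (by omega), ← hstep,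
                goConsNonzero0 r tail _ _ _ hrne]
              congr 1
              ring
      · -- a nonzero run of length 1 + |zs|
        rw [goConsNonzero0 m rest idx x start hm, altNonzero m rest x idx hm]
        set zs := rest.takeWhile (fun z => !(z == 0)) with hzs
        set rest' := rest.dropWhile (fun z => !(z == 0)) with hrest'
        have hsplit : zs ++ rest' = rest := List.takeWhile_append_dropWhile
        have hall : ∀ z ∈ zs, z ≠ 0 := by
          intro z hz
          rw [hzs] at hz
          simpa using List.mem_takeWhile_imp hz
        have hlen' : rest'.length ≤ n := by
          have hd : rest'.length ≤ rest.length := by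
            rw [hrest']; exact List.length_dropWhile_le _ _
          simp only [List.length_cons] at hlen
          omega
        rw [← hsplit, alloPoloGo_nonzero_run zs rest' (idx + 1) x start hall,
          ih rest' hlen' (idx + 1 + (zs.length : Int)) x start hx]
        congr 1
        ring

-- ===== VERDICT (by name: the statement is the Claim_ definition above) =====
theorem alloPolo_spec : Claim_equal_alloPolo := by
  intro memory x _
  unfold Spec_alloPolo alloPolo alloPolo_alt
  by_cases hx : x ≤ 0
  · rw [if_pos hx]
    exact alloPoloGo_nonpos memory 0 x (-1) 0 hx le_rfl
  · rw [if_neg hx]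
    exact alloPoloGo_eq_alt memory.length memory le_rfl 0 x (-1) (by omega)
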